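-- pv_equiv track=rewrite | github.com/namel3ss-Ai/namel3ss | src/namel3ss/lint/routes.py | _route_type_valid
-- ===== SOURCE A (Python) =====
-- _ROUTE_TYPES = {"text", "number", "boolean", "json"}
--
-- def _route_type_valid(type_name: str, record_names: set[str]) -> bool:
--     if not isinstance(type_name, str) or not type_name:
--         return False
--     inner = _split_list_type(type_name)
--     if inner is not None:
--         return _route_type_valid(inner, record_names)
--     if type_name in _ROUTE_TYPES:
--         return True
--     return type_name in record_names
--
-- def _split_list_type(type_name: str) -> str | None:
--     if not type_name.startswith("list<"):
--         return None
--     depth = 0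
--     start = None
--     end = None
--     for idx, ch in enumerate(type_name):
--         if ch == "<":
--             depth += 1
--             if depth == 1:
--                 start = idx + 1
--         elif ch == ">":
--             depth -= 1
--             if depth == 0:
--                 end = idx
--                 break
--     if start is None or end is None or end != len(type_name) - 1:
--         return None
--     inner = type_name[start:end].strip()
--     if not inner:
--         return None
--     return inner
-- ===== SOURCE B (Python) =====
-- _ROUTE_TYPES = {"text", "number", "boolean", "json"}
--
-- def _route_type_valid(type_name, record_names):
--     if not isinstance(type_name, str) or not type_name:
--         return False
--     name = type_name
--     while name.startswith("list<"):
--         depth = 1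
--         end = -1
--         for idx in range(5, len(name)):
--             ch = name[idx]
--             if ch == "<":
--                 depth += 1
--             elif ch == ">":
--                 depth -= 1
--                 if depth == 0:
--                     end = idx
--                     break
--         if end != len(name) - 1:
--             break
--         inner = name[5:end].strip()
--         if not inner:
--             break
--         name = inner
--     return name in _ROUTE_TYPES or name in record_names
-- ===== Notes on version B (the rewrite author's own statement) =====
-- stated objective: alternative
-- what changed: Replaced the mutually recursive helper decomposition (recursive _route_type_valid calling a separate _split_list_type parser that re-scans from index 0 tracking start/end state) with a single iterative while-loop that keeps a current name, inlines the bracket scan starting directly after the known 'list<' prefix with depth preset to 1 and an end sentinel of -1, and performs the membership test once after the loop.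
import Mathlib
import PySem

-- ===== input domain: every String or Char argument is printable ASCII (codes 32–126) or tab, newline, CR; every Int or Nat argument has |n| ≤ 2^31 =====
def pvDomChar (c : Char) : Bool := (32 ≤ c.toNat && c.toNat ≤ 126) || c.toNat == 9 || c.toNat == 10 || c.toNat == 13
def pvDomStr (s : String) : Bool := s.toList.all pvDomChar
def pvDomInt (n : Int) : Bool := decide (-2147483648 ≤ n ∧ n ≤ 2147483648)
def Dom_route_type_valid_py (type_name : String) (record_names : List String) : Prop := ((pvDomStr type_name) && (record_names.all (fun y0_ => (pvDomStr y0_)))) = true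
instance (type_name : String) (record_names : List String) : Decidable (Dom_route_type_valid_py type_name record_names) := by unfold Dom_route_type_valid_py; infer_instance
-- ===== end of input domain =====

-- B replaces A's recursive validate/parse helper pair by one iterative peeling loop with the
-- bracket scan inlined after the 'list<' prefix (objective: alternative decomposition, same cost).
-- Both recursions strictly shrink the string, so fuel = length + 1 is only a totality device.

-- ===== PORT A =====
-- _ROUTE_TYPES, as the list of its distinct members (used for membership tests only)
def pvRouteTypes : List (List Char) := ["text".toList, "number".toList, "boolean".toList, "json".toList]

-- the for-loop of _split_list_type: remaining chars, current idx, depth, start?; returns (start?, end?)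
def pvScanA : List Char → Nat → Int → Option Nat → Option Nat × Option Nat
  | [], _, _, s => (s, none)
  | ch :: rest, idx, depth, s =>
    if ch = '<' then
      let d := depth + 1
      pvScanA rest (idx + 1) d (if d = 1 then some (idx + 1) else s)
    else if ch = '>' then
      let d := depth - 1
      if d = 0 then (s, some idx)
      else pvScanA rest (idx + 1) d s
    else pvScanA rest (idx + 1) depth s

-- _split_list_type
def pvSplitListType (cs : List Char) : Option (List Char) :=
  if ¬ PySem.Chars.startswith cs "list<".toList then none
  else
    match pvScanA cs 0 0 none with
    | (some st, some en) =>
      if en ≠ cs.length - 1 then none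
      else if PySem.Chars.strip (PySem.Chars.slice cs (some (st : Int)) (some (en : Int))) = [] then none
      else some (PySem.Chars.strip (PySem.Chars.slice cs (some (st : Int)) (some (en : Int))))
    | _ => none

-- _route_type_valid (recursive; each recursive call strictly shrinks the string, so the
-- fuel passed at the top level is never exhausted)
def pvRouteAF : Nat → List Char → List (List Char) → Bool
  | 0, _, _ => false
  | fuel + 1, cs, record =>
    if cs = [] then false
    else
      match pvSplitListType cs with
      | some inner => pvRouteAF fuel inner record
      | none =>
        if decide (cs ∈ pvRouteTypes) then true
        else decide (cs ∈ record)

def route_type_valid_py (type_name : String) (record_names : List String) : Bool :=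
  pvRouteAF (type_name.toList.length + 1) type_name.toList (record_names.map String.toList)

-- ===== PORT B =====
-- the inlined for-loop of B: chars from index 5 on, depth (preset to 1), idx; returns end or -1
def pvScanB : List Char → Int → Nat → Int
  | [], _, _ => -1
  | ch :: rest, depth, idx =>
    if ch = '<' then pvScanB rest (depth + 1) (idx + 1)
    else if ch = '>' then
      let d := depth - 1
      if d = 0 then (idx : Int) else pvScanB rest d (idx + 1)
    else pvScanB rest depth (idx + 1)

-- the while-loop of B: peel valid list<...> wrappers until no step applies (each iteration
-- strictly shrinks the string, so the fuel passed at the top level is never exhausted)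
def pvPeelBF : Nat → List Char → List Char
  | 0, cs => cs
  | fuel + 1, cs =>
    if PySem.Chars.startswith cs "list<".toList then
      if pvScanB (cs.drop 5) 1 5 ≠ (cs.length : Int) - 1 then cs
      else if PySem.Chars.strip
          (PySem.Chars.slice cs (some 5) (some (pvScanB (cs.drop 5) 1 5))) = [] then cs
      else pvPeelBF fuel (PySem.Chars.strip
          (PySem.Chars.slice cs (some 5) (some (pvScanB (cs.drop 5) 1 5))))
    else cs

def route_type_valid_py_alt (type_name : String) (record_names : List String) : Bool :=
  if type_name.toList = [] then false
  else
    let name := pvPeelBF (type_name.toList.length + 1) type_name.toList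
    decide (name ∈ pvRouteTypes) || decide (name ∈ record_names.map String.toList)

-- ===== PRECONDITION & SPEC =====
def Spec_route_type_valid_py (type_name : String) (record_names : List String) (out : Bool) : Prop := out = route_type_valid_py_alt type_name record_names
instance (type_name : String) (record_names : List String) (out : Bool) : Decidable (Spec_route_type_valid_py type_name record_names out) := by unfold Spec_route_type_valid_py; infer_instance

-- ===== CLAIM (what is proved, stated in full; the proofs are below) =====
def Claim_equal_route_type_valid_py : Prop := ∀ (type_name : String) (record_names : List String), Dom_route_type_valid_py type_name record_names → Spec_route_type_valid_py type_name record_names (route_type_valid_py type_name record_names)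

-- ===== LEMMAS AND PROOFS =====

-- strip never lengthens
theorem pvStripLenLe (cs : List Char) : (PySem.Chars.strip cs).length ≤ cs.length := by
  simp only [PySem.Chars.strip, PySem.Chars.lstrip, PySem.Chars.rstrip]
  calc ((List.dropWhile PySem.Chars.isspace
          (List.dropWhile PySem.Chars.isspace cs).reverse).reverse).length
      ≤ (List.dropWhile PySem.Chars.isspace cs).reverse.length := by
        simpa using (List.dropWhile_sublist (l := (List.dropWhile PySem.Chars.isspace cs).reverse)
          PySem.Chars.isspace).length_le
    _ ≤ cs.length := by
        simpa using (List.dropWhile_sublist (l := cs) PySem.Chars.isspace).length_le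

-- startswith("list<") gives the prefix decomposition
theorem pvPrefix {cs : List Char} (h : PySem.Chars.startswith cs "list<".toList = true) :
    "list<".toList <+: cs :=
  List.isPrefixOf_iff_prefix.mp (by simpa [PySem.Chars.startswith] using h)

-- B's loop body shrinks the string whenever it iterates
theorem pvPeelInnerLen {cs : List Char}
    (hpre : PySem.Chars.startswith cs "list<".toList = true) :
    (PySem.Chars.strip
      (PySem.Chars.slice cs (some 5) (some (pvScanB (cs.drop 5) 1 5)))).length
      < cs.length ∨ pvScanB (cs.drop 5) 1 5 ≠ (cs.length : Int) - 1 := by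
  by_cases he : pvScanB (cs.drop 5) 1 5 ≠ (cs.length : Int) - 1
  · exact Or.inr he
  · left
    have hlen : 5 ≤ cs.length := by simpa using (pvPrefix hpre).length_le
    have hee : pvScanB (cs.drop 5) 1 5 = ((cs.length - 1 : Nat) : Int) := by omega
    have hsl : (PySem.Chars.slice cs (some 5) (some (pvScanB (cs.drop 5) 1 5))).length
        ≤ cs.length - 1 := by
      simp only [PySem.Chars.slice]
      rw [hee, PySem.List.length_slice, PySem.List.clampIdx_natCast]
      omega
    have := pvStripLenLe (PySem.Chars.slice cs (some 5) (some (pvScanB (cs.drop 5) 1 5)))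
    omega

-- a successful split strictly shrinks
theorem pvSplitLen {cs inner : List Char} (h : pvSplitListType cs = some inner) :
    inner.length < cs.length := by
  unfold pvSplitListType at h
  by_cases hpre : PySem.Chars.startswith cs "list<".toList
  · have hlen : 5 ≤ cs.length := by simpa using (pvPrefix hpre).length_le
    rw [if_neg (not_not_intro hpre)] at h
    cases hscan : pvScanA cs 0 0 none with
    | mk st? en? =>
      rw [hscan] at h
      cases st? with
      | none => cases en? <;> simp at h
      | some st =>
        cases en? with
        | none => simp at h
        | some en =>
          change (if en ≠ cs.length - 1 then none
            else if PySem.Chars.strip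
                (PySem.Chars.slice cs (some (st : Int)) (some (en : Int))) = [] then none
            else some (PySem.Chars.strip
                (PySem.Chars.slice cs (some (st : Int)) (some (en : Int))))) = some inner at h
          by_cases hen : en ≠ cs.length - 1
          · rw [if_pos hen] at h; exact absurd h (by simp)
          · rw [if_neg hen] at h
            have hen' : en = cs.length - 1 := by omega
            have hsl : (PySem.Chars.slice cs (some (st : Int)) (some (en : Int))).length
                ≤ cs.length - 1 := by
              simp only [PySem.Chars.slice]
              rw [PySem.List.length_slice, PySem.List.clampIdx_natCast,
                PySem.List.clampIdx_natCast]
              omega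
            have hst := pvStripLenLe (PySem.Chars.slice cs (some (st : Int)) (some (en : Int)))
            split at h
            · exact absurd h (by simp)
            · have hi : inner = PySem.Chars.strip
                  (PySem.Chars.slice cs (some (st : Int)) (some (en : Int))) :=
                (Option.some.inj h).symm
              have hilen : inner.length = (PySem.Chars.strip
                  (PySem.Chars.slice cs (some (st : Int)) (some (en : Int)))).length := by
                rw [hi]
              omega
  · rw [if_pos hpre] at h; exact absurd h (by simp)

-- the fuel of B's loop is irrelevant as long as it exceeds the string length
theorem pvPeelMono : ∀ (f g : Nat) (cs : List Char), cs.length < f → cs.length < g →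
    pvPeelBF f cs = pvPeelBF g cs := by
  intro f
  induction f with
  | zero => intro g cs hf _; omega
  | succ f ih =>
    intro g cs hf hg
    cases g with
    | zero => omega
    | succ g =>
      show (if PySem.Chars.startswith cs "list<".toList then _ else cs) =
        (if PySem.Chars.startswith cs "list<".toList then _ else cs)
      by_cases hpre : PySem.Chars.startswith cs "list<".toList
      · rw [if_pos hpre, if_pos hpre]
        by_cases he : pvScanB (cs.drop 5) 1 5 ≠ (cs.length : Int) - 1
        · rw [if_pos he, if_pos he]
        · rw [if_neg he, if_neg he]
          by_cases hin : PySem.Chars.strip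
              (PySem.Chars.slice cs (some 5) (some (pvScanB (cs.drop 5) 1 5))) = []
          · rw [if_pos hin, if_pos hin]
          · rw [if_neg hin, if_neg hin]
            have hlt : (PySem.Chars.strip
                (PySem.Chars.slice cs (some 5) (some (pvScanB (cs.drop 5) 1 5)))).length
                < cs.length := by
              rcases pvPeelInnerLen hpre with h | h
              · exact h
              · exact absurd h he
            exact ih g _ (by omega) (by omega)
      · rw [if_neg hpre, if_neg hpre]

-- A's scan, once the depth is ≥ 1, never changes start and finds the same end as B's scan
theorem pvScanAB (rest : List Char) : ∀ (idx : Nat) (depth : Int), 1 ≤ depth → ∀ s,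
    pvScanA rest idx depth s =
      (s, if pvScanB rest depth idx < 0 then none else some (pvScanB rest depth idx).toNat) := by
  induction rest with
  | nil => intro idx depth _ s; simp [pvScanA, pvScanB]
  | cons ch rest ih =>
    intro idx depth hd s
    by_cases h1 : ch = '<'
    · have hne : ¬ (depth + 1 = 1) := by omega
      simp only [pvScanA, pvScanB, h1, hne, if_false, if_true]
      exact ih (idx + 1) (depth + 1) (by omega) s
    · by_cases h2 : ch = '>'
      · by_cases h3 : depth - 1 = 0
        · simp [pvScanA, pvScanB, h2, h3]
        · simp only [pvScanA, pvScanB, h2, h3, if_false, if_true]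
          exact ih (idx + 1) (depth - 1) (by omega) s
      · simp only [pvScanA, pvScanB, h1, h2, if_false]
        exact ih (idx + 1) depth hd s

-- the peel step of B computes exactly _split_list_type, then recurses
theorem pvPeelStep (cs : List Char) :
    pvPeelBF (cs.length + 1) cs = (match pvSplitListType cs with
      | some inner => pvPeelBF (inner.length + 1) inner
      | none => cs) := by
  by_cases hpre : PySem.Chars.startswith cs "list<".toList
  · have hlen : 5 ≤ cs.length := by simpa using (pvPrefix hpre).length_le
    obtain ⟨t, ht⟩ := pvPrefix hpre
    have hcs : cs = 'l' :: 'i' :: 's' :: 't' :: '<' :: t := by rw [← ht]; rfl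
    have hdrop : cs.drop 5 = t := by rw [hcs]; rfl
    have hscanA : pvScanA cs 0 0 none =
        (some 5, if pvScanB t 1 5 < 0 then none else some (pvScanB t 1 5).toNat) := by
      rw [hcs]
      show pvScanA ('l' :: 'i' :: 's' :: 't' :: '<' :: t) 0 0 none = _
      rw [pvScanA]; simp only [if_neg (by decide : ¬ ('l' : Char) = '<'),
        if_neg (by decide : ¬ ('l' : Char) = '>')]
      rw [pvScanA]; simp only [if_neg (by decide : ¬ ('i' : Char) = '<'),
        if_neg (by decide : ¬ ('i' : Char) = '>')]
      rw [pvScanA]; simp only [if_neg (by decide : ¬ ('s' : Char) = '<'),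
        if_neg (by decide : ¬ ('s' : Char) = '>')]
      rw [pvScanA]; simp only [if_neg (by decide : ¬ ('t' : Char) = '<'),
        if_neg (by decide : ¬ ('t' : Char) = '>')]
      rw [pvScanA]; simp only [if_pos (rfl : ('<' : Char) = '<')]
      simpa using pvScanAB t 5 (0 + 1) (by omega) (some (4 + 1))
    show (if PySem.Chars.startswith cs "list<".toList then _ else cs) = _
    rw [if_pos hpre]
    by_cases hneg : pvScanB t 1 5 < 0
    · have hsplit : pvSplitListType cs = none := by
        unfold pvSplitListType
        rw [if_neg (not_not_intro hpre), hscanA, if_pos hneg]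
      have hne : pvScanB (cs.drop 5) 1 5 ≠ (cs.length : Int) - 1 := by rw [hdrop]; omega
      rw [hsplit, if_pos hne]
    · have hE : ((pvScanB t 1 5).toNat : Int) = pvScanB t 1 5 := Int.toNat_of_nonneg (by omega)
      by_cases hend : pvScanB t 1 5 = (cs.length : Int) - 1
      · have hGeq : (pvScanB t 1 5).toNat = cs.length - 1 := by omega
        have hsplit : pvSplitListType cs =
            (if PySem.Chars.strip
                (PySem.Chars.slice cs (some 5) (some (pvScanB t 1 5))) = [] then none
             else some (PySem.Chars.strip
                (PySem.Chars.slice cs (some 5) (some (pvScanB t 1 5))))) := by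
          unfold pvSplitListType
          rw [if_neg (not_not_intro hpre), hscanA, if_neg hneg]
          simp [hGeq]
          have hcast : ((cs.length - 1 : Nat) : Int) = (cs.length : Int) - 1 := by omega
          rw [hcast, ← hend]
        have hend' : ¬ (pvScanB (cs.drop 5) 1 5 ≠ (cs.length : Int) - 1) := by
          rw [hdrop]; exact not_not_intro hend
        rw [if_neg hend', hdrop, hsplit]
        by_cases hin : PySem.Chars.strip
            (PySem.Chars.slice cs (some 5) (some (pvScanB t 1 5))) = []
        · rw [if_pos hin, if_pos hin]
        · rw [if_neg hin, if_neg hin]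
          have hlt : (PySem.Chars.strip
              (PySem.Chars.slice cs (some 5) (some (pvScanB t 1 5)))).length < cs.length := by
            rcases pvPeelInnerLen hpre with h | h
            · rw [hdrop] at h; exact h
            · rw [hdrop] at h; exact absurd hend h
          exact pvPeelMono cs.length _ _ hlt (by omega)
      · have hne2 : (pvScanB t 1 5).toNat ≠ cs.length - 1 := by omega
        have hsplit : pvSplitListType cs = none := by
          unfold pvSplitListType
          rw [if_neg (not_not_intro hpre), hscanA, if_neg hneg]
          simp [hne2]
        have hne' : pvScanB (cs.drop 5) 1 5 ≠ (cs.length : Int) - 1 := by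
          rw [hdrop]; exact hend
        rw [hsplit, if_pos hne']
  · have hsplit : pvSplitListType cs = none := by
      unfold pvSplitListType; rw [if_pos hpre]
    show (if PySem.Chars.startswith cs "list<".toList then _ else cs) = _
    rw [hsplit, if_neg hpre]

-- a successful split yields a non-empty inner
theorem pvSplitNe {cs inner : List Char} (h : pvSplitListType cs = some inner) : inner ≠ [] := by
  unfold pvSplitListType at h
  split at h
  · exact absurd h (by simp)
  · split at h
    · split at h
      · exact absurd h (by simp)
      · split at h
        · exact absurd h (by simp)
        · rename_i hne
          intro hinner
          exact hne (by rw [Option.some.inj h, hinner])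
    · exact absurd h (by simp)

-- A's recursion computes membership of B's fully peeled name
theorem pvMain : ∀ (f : Nat) (cs : List Char) (record : List (List Char)), cs.length < f →
    pvRouteAF f cs record =
      (if cs = [] then false
       else decide (pvPeelBF (cs.length + 1) cs ∈ pvRouteTypes)
            || decide (pvPeelBF (cs.length + 1) cs ∈ record)) := by
  intro f
  induction f with
  | zero => intro cs record hle; omega
  | succ f ih =>
    intro cs record hle
    show (if cs = [] then false else _) = _
    by_cases hnil : cs = []
    · simp [hnil]
    · simp only [hnil, if_false]
      cases hsplit : pvSplitListType cs with
      | some inner =>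
        have hlt := pvSplitLen hsplit
        have hne := pvSplitNe hsplit
        have hpeel : pvPeelBF (cs.length + 1) cs = pvPeelBF (inner.length + 1) inner := by
          rw [pvPeelStep cs, hsplit]
        show pvRouteAF f inner record = _
        rw [ih inner record (by omega), hpeel]
        simp [hne]
      | none =>
        show (if decide (cs ∈ pvRouteTypes) then true else decide (cs ∈ record)) = _
        have hpeel : pvPeelBF (cs.length + 1) cs = cs := by rw [pvPeelStep cs, hsplit]
        rw [hpeel]
        by_cases h1 : cs ∈ pvRouteTypes <;> simp [h1]

-- ===== VERDICT (by name: the statement is the Claim_ definition above) =====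
theorem route_type_valid_py_spec : Claim_equal_route_type_valid_py := by
  intro type_name record_names _
  unfold Spec_route_type_valid_py route_type_valid_py route_type_valid_py_alt
  exact pvMain (type_name.toList.length + 1) type_name.toList
    (record_names.map String.toList) (by omega)
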